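-- pv_equiv track=rewrite | github.com/komissvaleri/lesson_2.2 | task_5.py | str_numb
-- ===== SOURCE A (Python) =====
-- def str_numb(numbers, stop_sim):
--     parts = numbers.split(' ')
--     sum_1 = 0
--     for i in parts:
--         if i == stop_sim:
--             break
--         sum_1 += int(i)
--
--     return sum_1
--
-- stop_sim = '*'
-- ===== SOURCE B (Python) =====
-- def str_numb(numbers, stop_sim):
--     parts = numbers.split(' ')
--     idx = parts.index(stop_sim) if stop_sim in parts else len(parts)
--     return sum(int(x) for x in parts[:idx])
-- ===== Notes on version B (the rewrite author's own statement) =====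
-- stated objective: alternative
-- what changed: Replaces the running accumulator with break by locating the stop symbol's index first and summing int() over the leading slice.
import Mathlib
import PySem

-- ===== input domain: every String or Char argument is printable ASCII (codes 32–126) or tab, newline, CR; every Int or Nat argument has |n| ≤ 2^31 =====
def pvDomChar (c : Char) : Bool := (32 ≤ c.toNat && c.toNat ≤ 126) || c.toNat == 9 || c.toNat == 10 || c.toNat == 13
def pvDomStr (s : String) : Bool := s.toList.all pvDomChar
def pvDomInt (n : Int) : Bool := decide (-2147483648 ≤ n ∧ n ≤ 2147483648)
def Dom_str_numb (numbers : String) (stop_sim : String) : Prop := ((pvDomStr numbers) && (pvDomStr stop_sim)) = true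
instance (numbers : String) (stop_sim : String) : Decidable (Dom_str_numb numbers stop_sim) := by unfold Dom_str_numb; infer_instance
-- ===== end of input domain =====

-- B locates the stop symbol's index first and sums int() over the leading slice,
-- instead of A's running accumulator with break (objective: alternative decomposition).


-- ===== PORT A =====
-- the for-loop with break and running accumulator; int(i) = PySem.Int.ofStr?,
-- total via getD 0 — Pre_ excludes the inputs where Python's int() raises
def strNumbLoop (parts : List String) (stop_sim : String) (acc : Int) : Int :=
  match parts with
  | [] => acc
  | i :: rest =>
    if i = stop_sim then acc
    else strNumbLoop rest stop_sim (acc + (PySem.Int.ofStr? i).getD 0)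

def str_numb (numbers : String) (stop_sim : String) : Int :=
  strNumbLoop ((PySem.Str.split? numbers " ").getD []) stop_sim 0

-- ===== PORT B =====
-- idx = parts.index(stop_sim) if stop_sim in parts else len(parts); sum over parts[:idx]
def str_numb_alt (numbers : String) (stop_sim : String) : Int :=
  let parts := (PySem.Str.split? numbers " ").getD []
  let idx := (PySem.List.index? parts stop_sim).getD parts.length
  ((parts.take idx).map (fun x => (PySem.Int.ofStr? x).getD 0)).sum

-- ===== PRECONDITION & SPEC =====
-- Pre_ excludes exactly the inputs where Python's int() raises ValueError:
-- every token strictly before the first stop symbol must parse as an int.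
def Pre_str_numb (numbers : String) (stop_sim : String) : Prop :=
  ∀ t ∈ ((PySem.Str.split? numbers " ").getD []).takeWhile (fun t => t ≠ stop_sim),
    (PySem.Int.ofStr? t).isSome
instance (numbers : String) (stop_sim : String) : Decidable (Pre_str_numb numbers stop_sim) := by
  unfold Pre_str_numb; infer_instance
def pvWitness_str_numb : String × String := ("1 2 3 * 4", "*")
def Spec_str_numb (numbers : String) (stop_sim : String) (out : Int) : Prop := out = str_numb_alt numbers stop_sim
instance (numbers : String) (stop_sim : String) (out : Int) : Decidable (Spec_str_numb numbers stop_sim out) := by unfold Spec_str_numb; infer_instance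

-- ===== CLAIM (what is proved, stated in full; the proofs are below) =====
def Claim_equal_str_numb : Prop := ∀ (numbers : String) (stop_sim : String), Dom_str_numb numbers stop_sim → Pre_str_numb numbers stop_sim → Spec_str_numb numbers stop_sim (str_numb numbers stop_sim)

-- ===== LEMMAS AND PROOFS =====

-- A's loop computes acc + the sum over the tokens before the first stop symbol
theorem strNumbLoop_eq_sum_takeWhile (parts : List String) (s : String) (acc : Int) :
    strNumbLoop parts s acc
      = acc + ((parts.takeWhile (fun t => t ≠ s)).map
                 (fun x => (PySem.Int.ofStr? x).getD 0)).sum := by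
  induction parts generalizing acc with
  | nil => simp [strNumbLoop]
  | cons i rest ih =>
    by_cases h : i = s
    · simp [strNumbLoop, h, List.takeWhile]
    · simp [strNumbLoop, h, List.takeWhile, ih]
      ring

-- B's cutoff slice is exactly the takeWhile before the first occurrence
theorem take_index_eq_takeWhile (l : List String) (v : String) :
    l.take ((PySem.List.index? l v).getD l.length)
      = l.takeWhile (fun t => t ≠ v) := by
  induction l with
  | nil => simp
  | cons x xs ih =>
    simp only [PySem.List.index?_eq_idxOf?, List.idxOf?_cons] at ih ⊢
    by_cases h : x = v
    · simp [h, List.takeWhile]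
    · simp only [beq_iff_eq, h, if_false, List.takeWhile, decide_not]
      cases hidx : (xs.idxOf? v) with
      | none => simp only [hidx, Option.getD_none] at ih
                simp [List.take_succ_cons, ih]
      | some k => simp only [hidx, Option.getD_some] at ih
                  simp [List.take_succ_cons, ih]

-- ===== VERDICT (by name: the statement is the Claim_ definition above) =====
theorem str_numb_spec : Claim_equal_str_numb := by
  intro numbers stop_sim _ _
  unfold Spec_str_numb str_numb str_numb_alt
  rw [strNumbLoop_eq_sum_takeWhile]
  show _ = (((( PySem.Str.split? numbers " ").getD []).take
      ((PySem.List.index? ((PySem.Str.split? numbers " ").getD []) stop_sim).getD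
        ((PySem.Str.split? numbers " ").getD []).length)).map
      (fun x => (PySem.Int.ofStr? x).getD 0)).sum
  rw [take_index_eq_takeWhile]
  ring
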